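-- pv_equiv track=rewrite | github.com/MaasterOogwaay/CollegeWork | SoftwareDev/Year2/Sem1/SamplePracticalExam/Q4b_1_skel.py | addDoubleDigit
-- ===== SOURCE A (Python) =====
-- def addDoubleDigit(listp):
--     if len(listp) == 0:
--         return 0
--     else:
--         total = 0
--         first = listp.pop(0)
--         if 10 <= first < 100:
--             total += first
--             return first + addDoubleDigit(listp)
--         else:
--             return 0 + addDoubleDigit(listp)
-- ===== SOURCE B (Python) =====
-- def addDoubleDigit(listp):
--     total = 0
--     while listp:
--         first = listp.pop(0)
--         if 10 <= first < 100:
--             total += first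
--     return total
-- ===== Notes on version B (the rewrite author's own statement) =====
-- stated objective: simpler
-- what changed: Replaces A's recursive pop-and-recurse descent with a flat iterative accumulator loop (same front-popping mutation, so listp is emptied as A leaves it).
import Mathlib
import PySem

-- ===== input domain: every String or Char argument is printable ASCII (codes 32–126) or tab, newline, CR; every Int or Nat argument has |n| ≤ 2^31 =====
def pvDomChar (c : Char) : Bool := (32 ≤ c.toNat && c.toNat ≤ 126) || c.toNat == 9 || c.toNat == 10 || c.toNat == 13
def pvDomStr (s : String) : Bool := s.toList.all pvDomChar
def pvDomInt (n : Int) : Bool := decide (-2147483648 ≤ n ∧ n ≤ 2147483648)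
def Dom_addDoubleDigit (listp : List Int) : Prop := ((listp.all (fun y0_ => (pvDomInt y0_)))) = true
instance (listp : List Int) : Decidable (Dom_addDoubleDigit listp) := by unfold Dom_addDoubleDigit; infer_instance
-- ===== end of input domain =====

-- B replaces A's recursive pop-and-recurse descent with a flat iterative accumulator
-- loop (simpler); equivalence is about the RETURN value — both Pythons empty listp by pop(0).

-- ===== PORT A =====
-- A: if empty return 0; else pop the head, and either add it (10 ≤ first < 100) to the
-- recursive result or return 0 + the recursive result.
def addDoubleDigit (listp : List Int) : Int :=
  match listp with
  | [] => 0
  | first :: rest =>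
      if 10 ≤ first ∧ first < 100 then first + addDoubleDigit rest
      else 0 + addDoubleDigit rest

-- ===== PORT B =====
-- B: while listp nonempty, pop the front and accumulate into total; return total.
def addDoubleDigitLoop (total : Int) (listp : List Int) : Int :=
  match listp with
  | [] => total
  | first :: rest =>
      addDoubleDigitLoop (if 10 ≤ first ∧ first < 100 then total + first else total) rest

def addDoubleDigit_alt (listp : List Int) : Int := addDoubleDigitLoop 0 listp

-- ===== PRECONDITION & SPEC =====
def Spec_addDoubleDigit (listp : List Int) (out : Int) : Prop := out = addDoubleDigit_alt listp
instance (listp : List Int) (out : Int) : Decidable (Spec_addDoubleDigit listp out) := by unfold Spec_addDoubleDigit; infer_instance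

-- ===== CLAIM (what is proved, stated in full; the proofs are below) =====
def Claim_equal_addDoubleDigit : Prop := ∀ (listp : List Int), Dom_addDoubleDigit listp → Spec_addDoubleDigit listp (addDoubleDigit listp)

-- ===== LEMMAS AND PROOFS =====
theorem addDoubleDigitLoop_eq (listp : List Int) :
    ∀ total : Int, addDoubleDigitLoop total listp = total + addDoubleDigit listp := by
  induction listp with
  | nil => intro total; simp [addDoubleDigitLoop, addDoubleDigit]
  | cons first rest ih =>
      intro total
      by_cases h : 10 ≤ first ∧ first < 100 <;>
        simp [addDoubleDigitLoop, addDoubleDigit, h, ih] <;> ring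

-- ===== VERDICT (by name: the statement is the Claim_ definition above) =====
theorem addDoubleDigit_spec : Claim_equal_addDoubleDigit := by
  intro listp _
  unfold Spec_addDoubleDigit addDoubleDigit_alt
  rw [addDoubleDigitLoop_eq]
  ring
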